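-- pv_equiv track=rewrite | github.com/wilwil186/lemon1 | problems/validar.py | validar
-- ===== SOURCE A (Python) =====
-- def validar(s):
--     # Convertimos el string a minúsculas
--     s = s.lower()
--     # Inicializamos un diccionario para contar las letras
--     contadores = {'h': 0, 'o': 0, 'l': 0, 'a': 0}
--     # Iteramos por cada letra del string
--     for letra in s:
--         # Si la letra no es una de las letras de "hola", no es válido
--         if letra not in contadores:
--             return "FALSO"
--         # Si es una letra válida, aumentamos el contador correspondiente
--         contadores[letra] += 1
--     # Comprobamos que se haya escrito cada letra al menos una vez
--     for letra, contador in contadores.items():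
--         if contador == 0:
--             return "FALSO"
--     # Comprobamos que se hayan escrito las letras en el orden correcto
--     if s.find('h') < s.find('o') < s.find('l') < s.rfind('l') < s.find('a'):
--         return "VERDADERO"
--     else:
--         return "FALSO"
-- ===== SOURCE B (Python) =====
-- def validar(s):
--     # One index-collecting pass instead of A's count dict + five find/rfind scans (alternative decomposition).
--     s = s.lower()
--     fh = fo = fl = fa = ll = -1
--     foreign = False
--     for i, c in enumerate(s):
--         if c == 'h':
--             if fh < 0:
--                 fh = i
--         elif c == 'o':
--             if fo < 0:
--                 fo = i
--         elif c == 'l':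
--             if fl < 0:
--                 fl = i
--             ll = i
--         elif c == 'a':
--             if fa < 0:
--                 fa = i
--         else:
--             foreign = True
--     if foreign or fh < 0 or fo < 0 or fl < 0 or fa < 0:
--         return "FALSO"
--     return "VERDADERO" if fh < fo < fl < ll < fa else "FALSO"
-- ===== Notes on version B (the rewrite author's own statement) =====
-- stated objective: alternative
-- what changed: Replaces A's count dict plus five separate find/rfind scans with a single index-collecting pass that records the first index of each of h,o,l,a, the last index of l and a foreign-character flag, then checks the index chain once; it trades A's early return and C-level scans for one uniform pass.
import Mathlib
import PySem

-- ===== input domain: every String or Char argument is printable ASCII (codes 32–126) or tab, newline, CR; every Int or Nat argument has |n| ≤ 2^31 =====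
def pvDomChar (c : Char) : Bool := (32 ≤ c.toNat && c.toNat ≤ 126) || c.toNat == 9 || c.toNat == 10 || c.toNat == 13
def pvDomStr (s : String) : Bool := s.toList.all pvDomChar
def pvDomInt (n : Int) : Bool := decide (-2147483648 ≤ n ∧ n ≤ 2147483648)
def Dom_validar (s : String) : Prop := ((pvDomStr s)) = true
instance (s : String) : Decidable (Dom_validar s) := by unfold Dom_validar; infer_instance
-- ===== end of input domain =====

-- B replaces A's count dict plus five find/rfind scans with one index-collecting pass over the string (alternative decomposition, same results).



-- ===== PORT A =====
-- contadores = {'h': 0, 'o': 0, 'l': 0, 'a': 0}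
def validarDict0 : PySem.Dict Char Int := PySem.Dict.mk [('h', 0), ('o', 0), ('l', 0), ('a', 0)]

-- the first loop: the early "FALSO" return is modelled as `none`
def validarCount : List Char → PySem.Dict Char Int → Option (PySem.Dict Char Int)
  | [], d => some d
  | c :: rest, d =>
      if d.contains c then validarCount rest (d.modify c 0 (· + 1)) else none

-- the second loop over contadores.items(): `true` = some counter is 0 (early "FALSO")
def validarZero : List (Char × Int) → Bool
  | [] => false
  | (_, v) :: rest => if v = 0 then true else validarZero rest

def validar (s : String) : String :=
  let t := PySem.Str.lower s
  match validarCount t.toList validarDict0 with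
  | none => "FALSO"
  | some d =>
      if validarZero d.items then "FALSO"
      else if PySem.Str.find t "h" < PySem.Str.find t "o" ∧
              PySem.Str.find t "o" < PySem.Str.find t "l" ∧
              PySem.Str.find t "l" < PySem.Str.rfind t "l" ∧
              PySem.Str.rfind t "l" < PySem.Str.find t "a" then "VERDADERO"
      else "FALSO"

-- ===== PORT B =====
-- one pass: first index of each of h,o,l,a, last index of l, and a foreign-character flag
structure VSt where
  fh : Int
  fo : Int
  fl : Int
  fa : Int
  ll : Int
  foreign : Bool
deriving Repr, DecidableEq

def validarStep (st : VSt) (p : Int × Char) : VSt :=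
  if p.2 = 'h' then (if st.fh < 0 then { st with fh := p.1 } else st)
  else if p.2 = 'o' then (if st.fo < 0 then { st with fo := p.1 } else st)
  else if p.2 = 'l' then
    { (if st.fl < 0 then { st with fl := p.1 } else st) with ll := p.1 }
  else if p.2 = 'a' then (if st.fa < 0 then { st with fa := p.1 } else st)
  else { st with foreign := true }

def validar_alt (s : String) : String :=
  let t := PySem.Str.lower s
  let st := (PySem.List.enumerate t.toList 0).foldl validarStep ⟨-1, -1, -1, -1, -1, false⟩
  if st.foreign || decide (st.fh < 0) || decide (st.fo < 0) || decide (st.fl < 0) || decide (st.fa < 0) then "FALSO"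
  else if st.fh < st.fo ∧ st.fo < st.fl ∧ st.fl < st.ll ∧ st.ll < st.fa then "VERDADERO"
  else "FALSO"

-- ===== PRECONDITION & SPEC =====
def Spec_validar (s : String) (out : String) : Prop := out = validar_alt s
instance (s : String) (out : String) : Decidable (Spec_validar s out) := by unfold Spec_validar; infer_instance

-- ===== CLAIM (what is proved, stated in full; the proofs are below) =====
def Claim_equal_validar : Prop := ∀ (s : String), Dom_validar s → Spec_validar s (validar s)

-- ===== LEMMAS AND PROOFS =====
-- helpers
def inHolaB (c : Char) : Bool := c == 'h' || c == 'o' || c == 'l' || c == 'a'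

-- A: first loop characterization
theorem validarCount_spec (l : List Char) (d : PySem.Dict Char Int)
    (hk : d.keys = ['h', 'o', 'l', 'a']) :
    validarCount l d =
      if l.all inHolaB then some (l.foldl (fun d c => d.modify c 0 (· + 1)) d) else none := by
  induction l generalizing d with
  | nil => simp [validarCount]
  | cons c rest ih =>
      have hc : d.contains c = (inHolaB c) := by
        rw [PySem.Dict.contains_eq_decide_mem_keys, hk]
        simp [inHolaB]
        rcases Decidable.em (c = 'h') with h|h <;> rcases Decidable.em (c = 'o') with h2|h2 <;>
          rcases Decidable.em (c = 'l') with h3|h3 <;> rcases Decidable.em (c = 'a') with h4|h4 <;>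
          simp [h, h2, h3, h4]
      by_cases hmem : inHolaB c = true
      · have hk' : (d.modify c 0 (· + 1)).keys = ['h', 'o', 'l', 'a'] := by
          rw [PySem.Dict.keys_modify,
            PySem.Dict.keys_insert_of_contains _ _ (by rw [hc]; exact hmem), hk]
        simp [validarCount, hc, hmem, ih _ hk']
      · simp [validarCount, hc, hmem]

-- A: the final dict's items when every char is an hola letter
theorem validarItems_spec (l : List Char) (hall : l.all inHolaB = true) :
    (l.foldl (fun d c => d.modify c 0 (· + 1)) validarDict0).items =
      [('h', (l.count 'h' : Int)), ('o', (l.count 'o' : Int)),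
       ('l', (l.count 'l' : Int)), ('a', (l.count 'a' : Int))] := by
  have hk : (l.foldl (fun d c => d.modify c 0 (· + 1)) validarDict0).keys = ['h', 'o', 'l', 'a'] := by
    rw [PySem.Dict.keys_foldl_modify l 0 (fun _ _ v => v + 1) validarDict0,
      PySem.Set.update_eq_append_filter]
    have : List.filter (fun y => !(PySem.Set.contains validarDict0.keys y)) (PySem.Set.ofList l) = [] := by
      rw [List.filter_eq_nil_iff]
      intro y hy
      have hy' : y ∈ l := (PySem.Set.mem_ofList _ _).mp hy
      have := List.all_eq_true.mp hall y hy'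
      simp only [inHolaB, Bool.or_eq_true, beq_iff_eq] at this
      rcases this with ((h|h)|h)|h <;> subst h <;> decide
    rw [this, List.append_nil]
    rfl
  have hnd : (l.foldl (fun d c => d.modify c 0 (· + 1)) validarDict0).keys.Nodup := by
    rw [hk]; decide
  rw [PySem.Dict.items_eq_map_keys _ hnd 0, hk]
  have hg : ∀ c : Char, (l.foldl (fun d c => d.modify c 0 (· + 1)) validarDict0).getD c 0
      = validarDict0.getD c 0 + (l.count c : Int) :=
    fun c => PySem.Dict.getD_foldl_modify_add_one l validarDict0 c
  simp [List.map, hg]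
  refine ⟨?_, ?_, ?_, ?_⟩ <;> simp [validarDict0, PySem.Dict.getD_eq_get?_getD, PySem.Dict.get?_mk_cons]

-- find on a single-character needle = first index
theorem find_go_singleton (c : Char) (l : List Char) (k : Nat) :
    PySem.Chars.find.go [c] l k = (l.idxOf? c).elim (-1) (fun j => ((k + j : Nat) : Int)) := by
  induction l generalizing k with
  | nil => simp [PySem.Chars.find.go, List.idxOf?]
  | cons x rest ih =>
      by_cases hx : x = c
      · simp [PySem.Chars.find.go, List.isPrefixOf, hx, List.idxOf?, List.findIdx?_cons]
      · have hbx : (x == c) = false := by simp [hx]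
        have hbx' : (c == x) = false := by simp [Ne.symm hx]
        simp only [PySem.Chars.find.go, List.isPrefixOf, hbx', Bool.false_and,
          List.idxOf?, List.findIdx?_cons, hbx, ih]
        cases h : List.findIdx? (fun a => a == c) rest with
        | none => simp
        | some j => simp; omega

theorem find_singleton (c : Char) (l : List Char) :
    PySem.Chars.find l [c] = (l.idxOf? c).elim (-1) (fun j => (j : Int)) := by
  rw [show PySem.Chars.find l [c] = PySem.Chars.find.go [c] l 0 from rfl, find_go_singleton]
  cases l.idxOf? c <;> simp

-- last index of c, structurally from the front
def lidx (c : Char) : List Char → Option Nat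
  | [] => none
  | x :: rest =>
      match lidx c rest with
      | some k => some (k + 1)
      | none => if x = c then some 0 else none

theorem lidx_append (c x : Char) (l : List Char) :
    lidx c (l ++ [x]) = if x = c then some l.length else lidx c l := by
  induction l with
  | nil => by_cases h : x = c <;> simp [lidx, h]
  | cons y rest ih =>
      simp only [List.cons_append, lidx, ih]
      by_cases h : x = c
      · simp [h]
      · simp [h]

theorem prefix_singleton (c : Char) (t : List Char) :
    List.isPrefixOf [c] t = match t with | [] => false | y :: _ => c == y := by
  cases t <;> simp [List.isPrefixOf]

theorem prefix_singleton_cons (c y : Char) (t : List Char) :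
    List.isPrefixOf [c] (y :: t) = (c == y) := by simp [List.isPrefixOf]

theorem rgo_lt (c x : Char) (l : List Char) (m : Nat) (hm : m < l.length) :
    PySem.Chars.rfind.go (l ++ [x]) [c] m = PySem.Chars.rfind.go l [c] m := by
  induction m with
  | zero =>
      have h0 : 0 < l.length := hm
      obtain ⟨y, t, rfl⟩ := List.exists_cons_of_ne_nil (List.length_pos_iff.mp h0)
      simp [PySem.Chars.rfind.go, List.isPrefixOf]
  | succ j ih =>
      have hd : (l ++ [x]).drop (j + 1) = l.drop (j + 1) ++ [x] :=
        List.drop_append_of_le_length (by omega)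
      have hne : l.drop (j + 1) ≠ [] := by
        intro h
        have := List.length_drop (l := l) (i := j + 1)
        rw [h] at this
        simp at this
        omega
      obtain ⟨y, t, hyt⟩ := List.exists_cons_of_ne_nil hne
      simp only [PySem.Chars.rfind.go, hd, hyt, List.cons_append, prefix_singleton]
      by_cases hcy : (c == y) = true
      · simp [hcy]
      · simp only [Bool.not_eq_true] at hcy
        simp [hcy, ih (by omega)]

theorem rgo_succ (sv sub : List Char) (j : Nat) :
    PySem.Chars.rfind.go sv sub (j + 1) =
      if sub.isPrefixOf (sv.drop (j + 1)) then ((j + 1 : Nat) : Int)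
      else PySem.Chars.rfind.go sv sub j := rfl

theorem rfind_append_singleton (c x : Char) (l : List Char) :
    PySem.Chars.rfind (l ++ [x]) [c] =
      if x = c then (l.length : Int) else PySem.Chars.rfind l [c] := by
  cases l with
  | nil =>
      by_cases h : x = c <;>
        simp [PySem.Chars.rfind, PySem.Chars.rfind.go, List.isPrefixOf, h,
          beq_iff_eq, Ne.symm]
  | cons y t =>
      set L := y :: t with hLdef
      have hlen : (L ++ [x]).length = L.length + 1 := by simp
      rw [PySem.Chars.rfind, hlen, rgo_succ]
      have h1 : (L ++ [x]).drop (L.length + 1) = [] := by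
        apply List.drop_eq_nil_of_le; simp
      have h2 : (L ++ [x]).drop L.length = [x] := by
        rw [List.drop_append_of_le_length (le_refl _), List.drop_length]; rfl
      rw [h1]
      simp only [List.isPrefixOf, Bool.false_eq_true, if_false]
      obtain ⟨j, hj⟩ : ∃ j, L.length = j + 1 := ⟨t.length, by simp [hLdef]⟩
      rw [hj, rgo_succ, ← hj, h2, prefix_singleton_cons]
      by_cases hcx : x = c
      · simp [hcx, hj]
      · have : (c == x) = false := by simp [Ne.symm hcx]
        rw [this]
        simp only [Bool.false_eq_true, if_false, hcx]
        rw [rgo_lt c x L j (by omega)]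
        rw [PySem.Chars.rfind, hj, rgo_succ, ← hj]
        rw [List.drop_length]
        simp [List.isPrefixOf]

theorem rfind_singleton (c : Char) (l : List Char) :
    PySem.Chars.rfind l [c] = (lidx c l).elim (-1) (fun j => (j : Int)) := by
  induction l using List.reverseRecOn with
  | nil => simp [PySem.Chars.rfind, PySem.Chars.rfind.go, lidx, List.isPrefixOf]
  | append_singleton t x ih =>
      rw [rfind_append_singleton, lidx_append]
      by_cases h : x = c
      · simp [h]
      · simp [h, ih]

-- B: first/last matching index in an (index, char) list
def fstIdx (c : Char) : List (Int × Char) → Option Int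
  | [] => none
  | p :: rest => if p.2 = c then some p.1 else fstIdx c rest

def lstIdx (c : Char) : List (Int × Char) → Option Int
  | [] => none
  | p :: rest =>
      match lstIdx c rest with
      | some k => some k
      | none => if p.2 = c then some p.1 else none

theorem foldB_foreign (e : List (Int × Char)) (st : VSt) :
    (e.foldl validarStep st).foreign = (st.foreign || e.any (fun p => !(inHolaB p.2))) := by
  induction e generalizing st with
  | nil => simp
  | cons p rest ih =>
      have hstep : (validarStep st p).foreign = (st.foreign || !(inHolaB p.2)) := by
        by_cases h1 : p.2 = 'h' <;> by_cases h2 : p.2 = 'o' <;> by_cases h3 : p.2 = 'l' <;>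
          by_cases h4 : p.2 = 'a' <;>
          simp [validarStep, inHolaB, h1, h2, h3, h4] <;> split <;> rfl
      simp [List.foldl_cons, ih, hstep, Bool.or_assoc]

theorem step_fh (st : VSt) (p : Int × Char) :
    (validarStep st p).fh = if p.2 = 'h' then (if st.fh < 0 then p.1 else st.fh) else st.fh := by
  by_cases h1 : p.2 = 'h' <;> by_cases h2 : p.2 = 'o' <;> by_cases h3 : p.2 = 'l' <;>
    by_cases h4 : p.2 = 'a' <;> simp [validarStep, h1, h2, h3, h4] <;> split <;> rfl

theorem step_fo (st : VSt) (p : Int × Char) :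
    (validarStep st p).fo = if p.2 = 'o' then (if st.fo < 0 then p.1 else st.fo) else st.fo := by
  by_cases h1 : p.2 = 'h' <;> by_cases h2 : p.2 = 'o' <;> by_cases h3 : p.2 = 'l' <;>
    by_cases h4 : p.2 = 'a' <;> simp [validarStep, h1, h2, h3, h4] <;> split <;> rfl

theorem step_fl (st : VSt) (p : Int × Char) :
    (validarStep st p).fl = if p.2 = 'l' then (if st.fl < 0 then p.1 else st.fl) else st.fl := by
  by_cases h1 : p.2 = 'h' <;> by_cases h2 : p.2 = 'o' <;> by_cases h3 : p.2 = 'l' <;>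
    by_cases h4 : p.2 = 'a' <;> simp [validarStep, h1, h2, h3, h4] <;> split <;> rfl

theorem step_fa (st : VSt) (p : Int × Char) :
    (validarStep st p).fa = if p.2 = 'a' then (if st.fa < 0 then p.1 else st.fa) else st.fa := by
  by_cases h1 : p.2 = 'h' <;> by_cases h2 : p.2 = 'o' <;> by_cases h3 : p.2 = 'l' <;>
    by_cases h4 : p.2 = 'a' <;> simp [validarStep, h1, h2, h3, h4] <;> split <;> rfl

theorem step_ll (st : VSt) (p : Int × Char) :
    (validarStep st p).ll = if p.2 = 'l' then p.1 else st.ll := by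
  by_cases h1 : p.2 = 'h' <;> by_cases h2 : p.2 = 'o' <;> by_cases h3 : p.2 = 'l' <;>
    by_cases h4 : p.2 = 'a' <;> simp [validarStep, h1, h2, h3, h4] <;> split <;> rfl

theorem foldB_first (e : List (Int × Char)) (c : Char) (st : VSt)
    (proj : VSt → Int)
    (hstep : ∀ st p, proj (validarStep st p) =
      if p.2 = c then (if proj st < 0 then p.1 else proj st) else proj st)
    (hpos : ∀ p ∈ e, 0 ≤ p.1) :
    proj (e.foldl validarStep st) =
      if proj st < 0 then (fstIdx c e).elim (proj st) id else proj st := by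
  induction e generalizing st with
  | nil => simp [fstIdx]
  | cons p rest ih =>
      have hp : 0 ≤ p.1 := hpos p (by simp)
      have hrest : ∀ q ∈ rest, 0 ≤ q.1 := fun q hq => hpos q (by simp [hq])
      rw [List.foldl_cons, ih _ hrest]
      by_cases hc : p.2 = c
      · by_cases hneg : proj st < 0
        · rw [hstep]
          simp [hc, hneg, fstIdx]
          intro h
          exact absurd h (not_lt.mpr hp)
        · rw [hstep]
          simp [hc, hneg]
      · rw [hstep]
        simp [hc, fstIdx]

theorem foldB_last (e : List (Int × Char)) (c : Char) (st : VSt)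
    (proj : VSt → Int)
    (hstep : ∀ st p, proj (validarStep st p) = if p.2 = c then p.1 else proj st) :
    proj (e.foldl validarStep st) = (lstIdx c e).elim (proj st) id := by
  induction e generalizing st with
  | nil => simp [lstIdx]
  | cons p rest ih =>
      rw [List.foldl_cons, ih, hstep]
      by_cases hc : p.2 = c <;> cases hr : lstIdx c rest <;> simp [lstIdx, hc, hr]

theorem fstIdx_enumerate (c : Char) (l : List Char) (s : Int) :
    fstIdx c (PySem.List.enumerate l s) = (l.idxOf? c).map (fun k => s + (k : Int)) := by
  induction l generalizing s with
  | nil => simp [fstIdx, PySem.List.enumerate_nil, List.idxOf?]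
  | cons x rest ih =>
      rw [PySem.List.enumerate_cons]
      by_cases hx : x = c
      · simp [fstIdx, hx, List.idxOf?, List.findIdx?_cons]
      · have hbx : (x == c) = false := by simp [hx]
        simp only [fstIdx, hx, if_false, ih, List.idxOf?, List.findIdx?_cons, hbx]
        cases h : List.findIdx? (fun a => a == c) rest with
        | none => simp
        | some j => simp; ring

theorem lstIdx_enumerate (c : Char) (l : List Char) (s : Int) :
    lstIdx c (PySem.List.enumerate l s) = (lidx c l).map (fun k => s + (k : Int)) := by
  induction l generalizing s with
  | nil => simp [lstIdx, PySem.List.enumerate_nil, lidx]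
  | cons x rest ih =>
      rw [PySem.List.enumerate_cons]
      simp only [lstIdx, ih, lidx]
      cases h : lidx c rest with
      | none => by_cases hx : x = c <;> simp [hx]
      | some k => simp; ring

theorem enumerate_nonneg (l : List Char) : ∀ p ∈ PySem.List.enumerate l 0, 0 ≤ p.1 := by
  intro p hp
  obtain ⟨k, hk, rfl⟩ := (PySem.List.mem_enumerate_iff l 0 p).mp hp
  simp

theorem validarZero_quad (a b c d : Int) :
    validarZero [('h', a), ('o', b), ('l', c), ('a', d)] =
      (decide (a = 0) || decide (b = 0) || decide (c = 0) || decide (d = 0)) := by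
  simp only [validarZero]
  split_ifs <;> simp_all

theorem lidx_eq_none_iff (c : Char) (l : List Char) : lidx c l = none ↔ c ∉ l := by
  induction l with
  | nil => simp [lidx]
  | cons x rest ih =>
      simp only [lidx]
      cases h : lidx c rest with
      | some k =>
          have hc : c ∈ rest := by
            by_contra hc
            rw [ih.mpr hc] at h
            simp at h
          simp [List.mem_cons, hc]
      | none =>
          have hc : c ∉ rest := ih.mp h
          by_cases hx : x = c
          · simp [hx]
          · simp [List.mem_cons, hc, hx]
            exact fun h' => hx h'.symm

theorem validar_spec' (s : String) : validar s = validar_alt s := by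
  simp only [validar, validar_alt]
  set l := (PySem.Str.lower s).toList with hl
  have hkeys : validarDict0.keys = ['h', 'o', 'l', 'a'] := rfl
  rw [validarCount_spec l validarDict0 hkeys]
  set e := PySem.List.enumerate l 0 with he
  set st := e.foldl validarStep ⟨-1, -1, -1, -1, -1, false⟩ with hst
  have hpos := he ▸ enumerate_nonneg l
  have hforeign : st.foreign = !l.all inHolaB := by
    rw [hst, foldB_foreign]
    rw [← List.not_all_eq_any_not]
    have hmap : l = e.map (·.2) := (he ▸ (PySem.List.map_snd_enumerate l 0)).symm
    rw [Bool.false_or]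
    conv_rhs => rw [hmap]
    rw [List.all_map]
    rfl
  have hfh : st.fh = (l.idxOf? 'h').elim (-1) (fun k => (k : Int)) := by
    rw [hst, foldB_first e 'h' _ VSt.fh step_fh hpos]
    rw [if_pos (by decide), he, fstIdx_enumerate]
    cases l.idxOf? 'h' <;> simp
  have hfo : st.fo = (l.idxOf? 'o').elim (-1) (fun k => (k : Int)) := by
    rw [hst, foldB_first e 'o' _ VSt.fo step_fo hpos]
    rw [if_pos (by decide), he, fstIdx_enumerate]
    cases l.idxOf? 'o' <;> simp
  have hfl : st.fl = (l.idxOf? 'l').elim (-1) (fun k => (k : Int)) := by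
    rw [hst, foldB_first e 'l' _ VSt.fl step_fl hpos]
    rw [if_pos (by decide), he, fstIdx_enumerate]
    cases l.idxOf? 'l' <;> simp
  have hfa : st.fa = (l.idxOf? 'a').elim (-1) (fun k => (k : Int)) := by
    rw [hst, foldB_first e 'a' _ VSt.fa step_fa hpos]
    rw [if_pos (by decide), he, fstIdx_enumerate]
    cases l.idxOf? 'a' <;> simp
  have hll : st.ll = (lidx 'l' l).elim (-1) (fun k => (k : Int)) := by
    rw [hst, foldB_last e 'l' _ VSt.ll step_ll, he, lstIdx_enumerate]
    cases lidx 'l' l <;> simp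
  by_cases hall : l.all inHolaB = true
  · rw [if_pos hall]
    dsimp only
    rw [validarItems_spec l hall, validarZero_quad]
    rw [hforeign, hall]
    simp only [Bool.not_true, Bool.false_or]
    by_cases hH : 'h' ∈ l
    case neg =>
      have h1 : l.count 'h' = 0 := List.count_eq_zero.mpr hH
      have h2 : l.idxOf? 'h' = none := List.idxOf?_eq_none_iff.mpr hH
      simp [h1, hfh, h2]
    by_cases hO : 'o' ∈ l
    case neg =>
      have h1 : l.count 'o' = 0 := List.count_eq_zero.mpr hO
      have h2 : l.idxOf? 'o' = none := List.idxOf?_eq_none_iff.mpr hO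
      simp [h1, hfo, h2]
    by_cases hL : 'l' ∈ l
    case neg =>
      have h1 : l.count 'l' = 0 := List.count_eq_zero.mpr hL
      have h2 : l.idxOf? 'l' = none := List.idxOf?_eq_none_iff.mpr hL
      simp [h1, hfl, h2]
    by_cases hA : 'a' ∈ l
    case neg =>
      have h1 : l.count 'a' = 0 := List.count_eq_zero.mpr hA
      have h2 : l.idxOf? 'a' = none := List.idxOf?_eq_none_iff.mpr hA
      simp [h1, hfa, h2]
    -- all four letters present
    obtain ⟨kh, hkh⟩ := Option.isSome_iff_exists.mp (List.isSome_idxOf?.mpr hH)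
    obtain ⟨ko, hko⟩ := Option.isSome_iff_exists.mp (List.isSome_idxOf?.mpr hO)
    obtain ⟨kl, hkl⟩ := Option.isSome_iff_exists.mp (List.isSome_idxOf?.mpr hL)
    obtain ⟨ka, hka⟩ := Option.isSome_iff_exists.mp (List.isSome_idxOf?.mpr hA)
    obtain ⟨km, hkm⟩ : ∃ k, lidx 'l' l = some k := by
      cases hmm : lidx 'l' l with
      | none => exact absurd ((lidx_eq_none_iff 'l' l).mp hmm) (not_not_intro hL)
      | some k => exact ⟨k, rfl⟩
    have hcH : l.count 'h' ≠ 0 := by simp [List.count_eq_zero, hH]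
    have hcO : l.count 'o' ≠ 0 := by simp [List.count_eq_zero, hO]
    have hcL : l.count 'l' ≠ 0 := by simp [List.count_eq_zero, hL]
    have hcA : l.count 'a' ≠ 0 := by simp [List.count_eq_zero, hA]
    have bh : PySem.Str.find (PySem.Str.lower s) "h" = PySem.Chars.find l ['h'] := by
      simp only [PySem.Str.find, hl]
      rw [show ("h" : String).toList = ['h'] by decide]
    have bo : PySem.Str.find (PySem.Str.lower s) "o" = PySem.Chars.find l ['o'] := by
      simp only [PySem.Str.find, hl]
      rw [show ("o" : String).toList = ['o'] by decide]
    have bl : PySem.Str.find (PySem.Str.lower s) "l" = PySem.Chars.find l ['l'] := by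
      simp only [PySem.Str.find, hl]
      rw [show ("l" : String).toList = ['l'] by decide]
    have ba : PySem.Str.find (PySem.Str.lower s) "a" = PySem.Chars.find l ['a'] := by
      simp only [PySem.Str.find, hl]
      rw [show ("a" : String).toList = ['a'] by decide]
    have brl : PySem.Str.rfind (PySem.Str.lower s) "l" = PySem.Chars.rfind l ['l'] := by
      simp only [PySem.Str.rfind, hl]
      rw [show ("l" : String).toList = ['l'] by decide]
    rw [bh, bo, bl, ba, brl, find_singleton, find_singleton, find_singleton, find_singleton,
      rfind_singleton, hkh, hko, hkl, hka, hkm]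
    rw [hfh, hfo, hfl, hfa, hll, hkh, hko, hkl, hka, hkm]
    simp only [Option.elim_some]
    have g1 : decide ((l.count 'h' : Int) = 0) = false := by simp [hcH]
    have g2 : decide ((l.count 'o' : Int) = 0) = false := by simp [hcO]
    have g3 : decide ((l.count 'l' : Int) = 0) = false := by simp [hcL]
    have g4 : decide ((l.count 'a' : Int) = 0) = false := by simp [hcA]
    rw [g1, g2, g3, g4]
    simp
  · rw [if_neg hall]
    have : st.foreign = true := by rw [hforeign]; simp at hall ⊢; exact hall
    rw [this]
    simp

-- ===== VERDICT (by name: the statement is the Claim_ definition above) =====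
theorem validar_spec : Claim_equal_validar := by
  intro s _
  exact validar_spec' s
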